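-- pv_equiv track=rewrite | github.com/ColoursOfThrissur/CUA | core/task_analyzer.py | _extract_blocked_tasks
-- ===== SOURCE A (Python) =====
-- from typing import Optional, Dict, List
--
-- def _extract_blocked_tasks(iteration_history: List[Dict]) -> List[str]:
--     """Block files only in current session (last 5 iterations)"""
--     blocked = []
--
--     # Only look at recent history (last 5 iterations)
--     recent = iteration_history[-5:] if len(iteration_history) > 5 else iteration_history
--
--     file_attempts = {}
--     for h in recent:
--         file = h.get('file', '')
--         if not file:
--             continue
--
--         file_attempts[file] = file_attempts.get(file, 0) + 1
--
--     # Block files attempted 2+ times in recent history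
--     for file, count in file_attempts.items():
--         if count >= 2:
--             blocked.append(file)
--
--     return blocked
-- ===== SOURCE B (Python) =====
-- from typing import Optional, Dict, List
--
-- def _extract_blocked_tasks(iteration_history: List[Dict]) -> List[str]:
--     """Block files only in current session (last 5 iterations)"""
--     recent = iteration_history[-5:] if len(iteration_history) > 5 else iteration_history
--     files = [f for f in (h.get('file', '') for h in recent) if f]
--
--     def go(pending):
--         # emit the head iff it recurs in the tail; recurse on the tail with the head removed
--         if not pending:
--             return []
--         head, tail = pending[0], pending[1:]
--         rest = go([f for f in tail if f != head])
--         return [head] + rest if head in tail else rest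
--
--     return go(files)
-- ===== Notes on version B (the rewrite author's own statement) =====
-- stated objective: alternative
-- what changed: Replaced A's two staged passes (build a frequency dict over the recent files, then scan its items for count >= 2) by a counting-free recursive peel of the file list: emit the head iff it recurs in its tail, then recurse on the tail with all copies of the head filtered out.
import Mathlib
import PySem

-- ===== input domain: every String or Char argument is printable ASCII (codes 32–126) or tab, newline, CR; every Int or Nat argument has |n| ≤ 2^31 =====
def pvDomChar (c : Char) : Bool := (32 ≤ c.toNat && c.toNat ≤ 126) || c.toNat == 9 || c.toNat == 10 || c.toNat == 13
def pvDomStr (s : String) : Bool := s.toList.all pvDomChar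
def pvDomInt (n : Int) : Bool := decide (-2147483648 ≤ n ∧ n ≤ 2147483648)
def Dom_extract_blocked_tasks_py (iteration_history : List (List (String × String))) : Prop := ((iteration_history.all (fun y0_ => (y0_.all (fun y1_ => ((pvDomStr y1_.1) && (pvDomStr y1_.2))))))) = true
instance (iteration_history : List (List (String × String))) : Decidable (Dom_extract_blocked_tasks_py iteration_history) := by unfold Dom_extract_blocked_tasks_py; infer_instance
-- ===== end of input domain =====

-- B replaces A's frequency-dict build-then-scan with a recursive peel: emit the head of the
-- remaining file list iff it recurs in its tail, then recurse on the tail with the head removed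
-- (objective: alternative decomposition; no counting table at all).

-- ===== PORT A =====
-- literal transliteration of A: build counter dict over recent (skipping empty file),
-- then append keys with count ≥ 2 in dict order
def extract_blocked_tasks_py (iteration_history : List (List (String × String))) : List String :=
  let recent : List (List (String × String)) :=
    if iteration_history.length > 5 then PySem.List.slice iteration_history (some (-5)) none
    else iteration_history
  let file_attempts : PySem.Dict String Int :=
    recent.foldl (fun d h =>
      let file := PySem.Dict.getD (PySem.Dict.mk h) "file" ""
      if file == "" then d
      else d.insert file (d.getD file 0 + 1)) PySem.Dict.empty
  file_attempts.items.foldl (fun blocked fc =>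
    if fc.2 ≥ 2 then blocked ++ [fc.1] else blocked) []

-- ===== PORT B =====
-- B's recursive helper go: head recurs in tail → emit it; recurse on tail minus head
def pvGo : List String → List String
  | [] => []
  | head :: tail =>
    let rest := pvGo (tail.filter (fun f => f ≠ head))
    if head ∈ tail then head :: rest else rest
termination_by l => l.length
decreasing_by
  simp only [List.length_unattach]
  exact Nat.lt_succ_of_le (le_trans (List.length_filter_le _ _) (Nat.le_of_eq (List.length_attach)))

def extract_blocked_tasks_py_alt (iteration_history : List (List (String × String))) : List String :=
  let recent : List (List (String × String)) :=
    if iteration_history.length > 5 then PySem.List.slice iteration_history (some (-5)) none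
    else iteration_history
  let files : List String :=
    (recent.map (fun h => PySem.Dict.getD (PySem.Dict.mk h) "file" "")).filter (fun f => f ≠ "")
  pvGo files

-- ===== PRECONDITION & SPEC =====
def Spec_extract_blocked_tasks_py (iteration_history : List (List (String × String))) (out : List String) : Prop := out = extract_blocked_tasks_py_alt iteration_history
instance (iteration_history : List (List (String × String))) (out : List String) : Decidable (Spec_extract_blocked_tasks_py iteration_history out) := by unfold Spec_extract_blocked_tasks_py; infer_instance

-- ===== CLAIM (what is proved, stated in full; the proofs are below) =====
def Claim_equal_extract_blocked_tasks_py : Prop := ∀ (iteration_history : List (List (String × String))), Dom_extract_blocked_tasks_py iteration_history → Spec_extract_blocked_tasks_py iteration_history (extract_blocked_tasks_py iteration_history)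

-- ===== LEMMAS AND PROOFS =====

-- A's counting loop with its inline "skip empty" test equals the counter of the pre-filtered file list
theorem pvFoldSkip (l : List (List (String × String))) (d : PySem.Dict String Int) :
    l.foldl (fun d h =>
      let file := PySem.Dict.getD (PySem.Dict.mk h) "file" ""
      if file == "" then d
      else d.insert file (d.getD file 0 + 1)) d
    = ((l.map (fun h => PySem.Dict.getD (PySem.Dict.mk h) "file" "")).filter (fun f => f ≠ "")).foldl
        (fun d x => d.insert x (d.getD x 0 + 1)) d := by
  induction l generalizing d with
  | nil => rfl
  | cons h t ih =>
    simp only [List.foldl_cons, List.map_cons, List.filter_cons]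
    by_cases he : PySem.Dict.getD (PySem.Dict.mk h) "file" "" = ""
    · simpa [he] using ih d
    · simpa [he] using ih _

-- A's emitting loop: append file when count ≥ 2
theorem pvFoldAppendGe2 (l : List (String × Int)) (acc : List String) :
    l.foldl (fun blocked fc => if fc.2 ≥ 2 then blocked ++ [fc.1] else blocked) acc
    = acc ++ (l.filter (fun fc => fc.2 ≥ 2)).map (·.1) := by
  induction l generalizing acc with
  | nil => simp
  | cons p t ih =>
    simp only [List.foldl_cons, List.filter_cons]
    by_cases hp : p.2 ≥ 2
    · simp [hp, ih]
    · simp [hp, ih]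

-- set(xs) commutes with filtering
theorem pvOfListFilter (t : List String) (p : String → Bool) :
    PySem.Set.ofList (t.filter p) = (PySem.Set.ofList t).filter p := by
  induction t with
  | nil => rfl
  | cons a t ih =>
    by_cases ha : p a
    · simp only [List.filter_cons, ha, if_pos, PySem.Set.ofList_cons, ih,
        PySem.Set.discard, List.filter_filter]
      congr 1
      exact List.filter_congr (fun x _ => by by_cases hx : x = a <;> simp [hx, ha, Bool.and_comm])
    · simp only [List.filter_cons, ha, if_neg, Bool.false_eq_true, not_false_iff,
        PySem.Set.ofList_cons, ih, PySem.Set.discard, List.filter_filter]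
      exact (List.filter_congr (fun x _ => by
        by_cases hx : x = a <;> simp [hx, ha])).symm

theorem pvBneNe (a : String) : (fun y : String => !y == a) = (fun y : String => decide (y ≠ a)) := by
  funext y; by_cases h : y = a <;> simp [h]

-- B's recursion computes A's "first occurrences with count ≥ 2" selection
theorem pvGo_eq (l : List String) :
    pvGo l = (PySem.Set.ofList l).filter (fun f => decide ((2 : Int) ≤ (l.count f : Int))) := by
  induction hn : l.length using Nat.strong_induction_on generalizing l with
  | _ n ihn =>
  cases l with
  | nil => simp [pvGo]
  | cons head tail =>
    have hlt : (tail.filter (fun f => f ≠ head)).length < n := by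
      have := List.length_filter_le (fun f => decide (f ≠ head)) tail
      simp only [List.length_cons] at hn
      omega
    have ih := ihn _ hlt (tail.filter (fun f => f ≠ head)) rfl
    rw [show pvGo (head :: tail) =
        (if head ∈ tail then head :: pvGo (tail.filter (fun f => f ≠ head))
         else pvGo (tail.filter (fun f => f ≠ head))) from by simp [pvGo],
      PySem.Set.ofList_cons]
    simp only [List.filter_cons]
    have hcnt : ((head :: tail).count head : Int) = (tail.count head : Int) + 1 := by
      simp
    by_cases hmem : head ∈ tail
    · have h2 : (2 : Int) ≤ ((head :: tail).count head : Int) := by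
        rw [hcnt]
        have := List.count_pos_iff.mpr hmem
        omega
      simp only [hmem, if_pos, h2, decide_true]
      congr 1
      rw [ih, PySem.Set.discard, pvBneNe head, pvOfListFilter]
      refine List.filter_congr (fun x hx => ?_)
      have hxa : x ≠ head := by
        have := List.of_mem_filter hx
        simpa using this
      have hc : (tail.filter (fun f => decide ¬f = head)).count x = (head :: tail).count x := by
        rw [List.count_filter (by simp [hxa])]
        rw [List.count_cons]
        simp [Ne.symm hxa]
      simp only [ne_eq, hc]
    · have h2 : ¬ (2 : Int) ≤ ((head :: tail).count head : Int) := by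
        rw [hcnt]
        have : tail.count head = 0 := List.count_eq_zero.mpr hmem
        omega
      simp only [hmem, if_neg, h2, decide_false, Bool.false_eq_true, not_false_iff]
      rw [ih, PySem.Set.discard, pvBneNe head, pvOfListFilter]
      refine List.filter_congr (fun x hx => ?_)
      have hxa : x ≠ head := by
        have := List.of_mem_filter hx
        simpa using this
      have hc : (tail.filter (fun f => decide ¬f = head)).count x = (head :: tail).count x := by
        rw [List.count_filter (by simp [hxa])]
        rw [List.count_cons]
        simp [Ne.symm hxa]
      simp only [ne_eq, hc]

-- ===== VERDICT (by name: the statement is the Claim_ definition above) =====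
theorem extract_blocked_tasks_py_spec : Claim_equal_extract_blocked_tasks_py := by
  intro ih _
  unfold Spec_extract_blocked_tasks_py extract_blocked_tasks_py extract_blocked_tasks_py_alt
  simp only [pvFoldSkip, PySem.Dict.foldl_insert_getD_add_one_eq_counter,
    PySem.Dict.items_counter, pvGo_eq]
  rw [pvFoldAppendGe2]
  simp [List.filter_map, Function.comp_def]
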